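-- pv_equiv track=rewrite | github.com/hirasawaau/KU-compro-exercise | Lab/lab07/Homeworks/lab07-06.py | Count
-- ===== SOURCE A (Python) =====
-- from typing import List
--
-- def Count(Area:List[List[int]]):
--     count = 0
--     for i in range(len(Area)):
--         count+=1
--         Max = Area[i][0]
--         for j in range(1,len(Area[i])):
--             if Max < Area[i][j]:
--                 count+=1
--                 Max = Area[i][j]
--
--     return count
-- ===== SOURCE B (Python) =====
-- from itertools import accumulate
-- from typing import List
--
-- def Count(Area: List[List[int]]) -> int:
--     # per row, the answer is the number of distinct running (prefix) maxima
--     return sum(len(set(accumulate(row, max))) for row in Area)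
-- ===== Notes on version B (the rewrite author's own statement) =====
-- stated objective: simpler
-- what changed: Replaces the index-driven double loop with a running-max state by a one-line sum of the number of distinct prefix maxima per row (set of itertools.accumulate(row, max)); the explicit counter and Max variable disappear.
import Mathlib
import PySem

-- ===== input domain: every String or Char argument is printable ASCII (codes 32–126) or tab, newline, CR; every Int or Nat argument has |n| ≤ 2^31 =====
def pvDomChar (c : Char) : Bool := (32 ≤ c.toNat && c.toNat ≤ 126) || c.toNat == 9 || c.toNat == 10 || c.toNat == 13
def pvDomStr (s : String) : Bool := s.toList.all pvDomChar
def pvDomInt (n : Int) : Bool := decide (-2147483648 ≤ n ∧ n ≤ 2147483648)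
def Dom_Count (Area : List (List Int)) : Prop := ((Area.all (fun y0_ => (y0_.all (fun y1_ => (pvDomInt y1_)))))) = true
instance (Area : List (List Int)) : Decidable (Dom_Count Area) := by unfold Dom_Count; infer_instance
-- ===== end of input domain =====

-- B sums per row the number of distinct running (prefix) maxima instead of A's explicit
-- index-driven double loop with a counter; same cost, simpler decomposition.

-- ===== PORT A =====
def Count (Area : List (List Int)) : Int :=
  (PySem.List.pyRange 0 Area.length 1).foldl (fun count i =>
    ((PySem.List.pyRange 1 (PySem.List.pyGetD Area i []).length 1).foldl (fun (p : Int × Int) j =>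
        if p.2 < PySem.List.pyGetD (PySem.List.pyGetD Area i []) j 0 then
          (p.1 + 1, PySem.List.pyGetD (PySem.List.pyGetD Area i []) j 0) else p)
      (count + 1, PySem.List.pyGetD (PySem.List.pyGetD Area i []) 0 0)).1) 0

-- ===== PORT B =====
-- itertools.accumulate(row, max)
def prefixMaxFrom (m : Int) : List Int → List Int
  | [] => []
  | v :: vs => max m v :: prefixMaxFrom (max m v) vs

def pyAccumMax : List Int → List Int
  | [] => []
  | x :: xs => x :: prefixMaxFrom x xs

def Count_alt (Area : List (List Int)) : Int :=
  Area.foldl (fun s row => s + ((PySem.Set.ofList (pyAccumMax row)).length : Int)) 0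

-- ===== PRECONDITION & SPEC =====
-- Pre_ excludes exactly the inputs where A raises IndexError: a row must be nonempty (A reads row[0]).
def Pre_Count (Area : List (List Int)) : Prop := ∀ row ∈ Area, row ≠ []
instance (Area : List (List Int)) : Decidable (Pre_Count Area) := by unfold Pre_Count; infer_instance
def pvWitness_Count : List (List Int) := [[1, 2], [2, 1, 3]]

def Spec_Count (Area : List (List Int)) (out : Int) : Prop := out = Count_alt Area
instance (Area : List (List Int)) (out : Int) : Decidable (Spec_Count Area out) := by unfold Spec_Count; infer_instance

-- ===== CLAIM (what is proved, stated in full; the proofs are below) =====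
def Claim_equal_Count : Prop := ∀ (Area : List (List Int)), Dom_Count Area → Pre_Count Area → Spec_Count Area (Count Area)

-- ===== LEMMAS AND PROOFS =====

-- every element of prefixMaxFrom m xs is ≥ m
theorem prefixMaxFrom_le {m y : Int} {xs : List Int} (h : y ∈ prefixMaxFrom m xs) : m ≤ y := by
  induction xs generalizing m with
  | nil => simp [prefixMaxFrom] at h
  | cons v vs ih =>
    simp only [prefixMaxFrom, List.mem_cons] at h
    rcases h with h | h
    · omega
    · have := ih h; omega

-- distinct count of a list as a Finset cardinality
theorem set_ofList_length (l : List Int) : ((PySem.Set.ofList l).length : Int) = (l.toFinset.card : Int) := by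
  have hn : (PySem.Set.ofList l).Nodup := PySem.Set.nodup_ofList l
  have hfs : (PySem.Set.ofList l).toFinset = l.toFinset := by
    ext x; simp [PySem.Set.mem_ofList]
  have := List.toFinset_card_of_nodup hn
  rw [hfs] at this
  exact_mod_cast this.symm

-- A's inner loop, generalized: starting from (c, m), it adds (#distinct values of m :: prefixMaxFrom m xs) - 1
theorem inner_loop_eq (xs : List Int) : ∀ (c m : Int),
    (xs.foldl (fun (p : Int × Int) v => if p.2 < v then (p.1 + 1, v) else p) (c, m)).1
      = c + ((m :: prefixMaxFrom m xs).toFinset.card : Int) - 1 := by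
  induction xs with
  | nil => intro c m; simp [prefixMaxFrom]
  | cons v vs ih =>
    intro c m
    by_cases h : m < v
    · have hmax : max m v = v := by omega
      have hnm : m ∉ (v :: prefixMaxFrom v vs).toFinset := by
        simp only [List.mem_toFinset, List.mem_cons]
        rintro (rfl | hy)
        · omega
        · have := prefixMaxFrom_le hy; omega
      have hset : (m :: prefixMaxFrom m (v :: vs)).toFinset
          = insert m ((v :: prefixMaxFrom v vs).toFinset) := by
        simp [prefixMaxFrom, hmax]
      simp only [List.foldl_cons, if_pos h, ih]
      rw [hset, Finset.card_insert_of_notMem hnm]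
      push_cast; ring
    · have hmax : max m v = m := by omega
      have hset : (m :: prefixMaxFrom m (v :: vs)).toFinset
          = (m :: prefixMaxFrom m vs).toFinset := by
        simp [prefixMaxFrom, hmax, List.toFinset_cons]
      simp only [List.foldl_cons, if_neg h, ih, hset]

-- one row of A contributes exactly B's distinct-prefix-maxima count
theorem row_contrib (row : List Int) (hrow : row ≠ []) (c : Int) :
    ((PySem.List.pyRange 1 (row.length : Int)).foldl (fun (p : Int × Int) j =>
        if p.2 < PySem.List.pyGetD row j 0 then (p.1 + 1, PySem.List.pyGetD row j 0) else p)
      (c + 1, PySem.List.pyGetD row 0 0)).1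
      = c + ((PySem.Set.ofList (pyAccumMax row)).length : Int) := by
  obtain ⟨x, xs, rfl⟩ := List.exists_cons_of_ne_nil hrow
  rw [PySem.List.foldl_pyRange_pyGetD' (x :: xs) 0
      (fun (p : Int × Int) v => if p.2 < v then (p.1 + 1, v) else p) _ (by norm_num : (0:Int) ≤ 1)]
  simp only [PySem.List.pyGetD_zero_cons, Int.toNat_one, List.drop_succ_cons, List.drop_zero]
  rw [inner_loop_eq, set_ofList_length]
  rw [show pyAccumMax (x :: xs) = x :: prefixMaxFrom x xs from rfl]
  ring

-- ===== VERDICT (by name: the statement is the Claim_ definition above) =====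
theorem Count_spec : Claim_equal_Count := by
  intro Area hdom hpre
  unfold Spec_Count Count Count_alt
  rw [PySem.List.foldl_pyRange_zero_pyGetD' Area ([] : List Int)
    (fun count row =>
      ((PySem.List.pyRange 1 (row.length : Int)).foldl (fun (p : Int × Int) j =>
          if p.2 < PySem.List.pyGetD row j 0 then (p.1 + 1, PySem.List.pyGetD row j 0) else p)
        (count + 1, PySem.List.pyGetD row 0 0)).1) 0]
  induction Area using List.reverseRecOn with
  | nil => rfl
  | append_singleton rows row ih =>
    simp only [List.foldl_append, List.foldl_cons, List.foldl_nil]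
    have hd : Dom_Count rows := by
      simp only [Dom_Count, List.all_append] at hdom ⊢
      exact (Bool.and_eq_true_iff.mp hdom).1
    rw [ih hd (fun r hr => hpre r (List.mem_append_left _ hr)),
        row_contrib row (hpre row (by simp)) _]
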